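-- pv_equiv track=rewrite | github.com/SaaidiaFarouk/Genes-proteines-and-genomes-comparison-bioinformatique-III- | Week 4/Greedy_Sorting.py | k_sorting
-- ===== SOURCE A (Python) =====
-- def k_sorting(k,p):
--     if k in p:
--         g=p.index(k)
--     elif -k in p :
--         g=p.index(-k)
--
--     px=p[k-1:g+1]
--     px.reverse()
--     j=0
--     for i in range(k-1,g+1):
--         p[i]=0-px[j]
--         j+=1
--
--     return p
-- ===== SOURCE B (Python) =====
-- def k_sorting(k, p):
--     if k in p:
--         g = p.index(k)
--     elif -k in p:
--         g = p.index(-k)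
--     lo, hi = k - 1, g
--     while lo < hi:
--         p[lo], p[hi] = -p[hi], -p[lo]
--         lo += 1
--         hi -= 1
--     if lo == hi:
--         p[lo] = -p[lo]
--     return p
-- ===== Notes on version B (the rewrite author's own statement) =====
-- stated objective: alternative
-- what changed: B replaces A's slice-copy-reverse plus counter-indexed overwrite loop with an in-place two-pointer walk that swaps-and-negates the segment ends inward, keeping no auxiliary list.
import Mathlib
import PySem

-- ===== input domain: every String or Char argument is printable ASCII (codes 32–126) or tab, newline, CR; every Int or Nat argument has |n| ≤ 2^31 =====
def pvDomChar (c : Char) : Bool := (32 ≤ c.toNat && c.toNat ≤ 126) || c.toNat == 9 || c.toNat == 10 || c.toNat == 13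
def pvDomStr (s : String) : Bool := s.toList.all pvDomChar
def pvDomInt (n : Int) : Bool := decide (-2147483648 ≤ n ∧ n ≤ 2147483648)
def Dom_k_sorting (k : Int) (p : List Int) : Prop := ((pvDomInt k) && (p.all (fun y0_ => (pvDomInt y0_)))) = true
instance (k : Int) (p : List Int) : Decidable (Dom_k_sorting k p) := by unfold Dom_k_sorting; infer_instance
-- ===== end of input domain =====

-- B rewrites the reversal step as an in-place two-pointer swap-and-negate walk (no auxiliary copied slice);
-- equal return value; both Pythons mutate p in place to the same final state.

-- ===== PORT A =====
-- 'if k in p: g=p.index(k) elif -k in p: g=p.index(-k)'; none = Python raises UnboundLocalError (excluded by Pre_).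
-- The loop uses pySetD/pyGetD (total forms): exact on Pre_, where every touched index is in range (outside Pre_ Python raises).
def k_sorting (k : Int) (p : List Int) : List Int :=
  let g? : Option Nat :=
    if k ∈ p then PySem.List.index? p k
    else if -k ∈ p then PySem.List.index? p (-k)
    else none
  match g? with
  | none => p
  | some gn =>
    let g : Int := gn
    let px := (PySem.List.slice p (some (k - 1)) (some (g + 1))).reverse
    let st := (PySem.List.pyRange (k - 1) (g + 1) 1).foldl
      (fun (st : List Int × Int) i =>
        (PySem.List.pySetD st.1 i (0 - PySem.List.pyGetD px st.2 0), st.2 + 1))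
      (p, 0)
    st.1

-- ===== PORT B =====
-- while lo < hi: p[lo], p[hi] = -p[hi], -p[lo]; lo += 1; hi -= 1; then the odd middle element.
def swapNegLoop (p : List Int) (lo hi : Int) : List Int :=
  if lo < hi then
    swapNegLoop
      (PySem.List.pySetD (PySem.List.pySetD p lo (-(PySem.List.pyGetD p hi 0))) hi (-(PySem.List.pyGetD p lo 0)))
      (lo + 1) (hi - 1)
  else if lo = hi then PySem.List.pySetD p lo (-(PySem.List.pyGetD p lo 0))
  else p
termination_by (hi - lo).toNat
decreasing_by omega

def k_sorting_alt (k : Int) (p : List Int) : List Int :=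
  let g? : Option Nat :=
    if k ∈ p then PySem.List.index? p k
    else if -k ∈ p then PySem.List.index? p (-k)
    else none
  match g? with
  | none => p
  | some gn => swapNegLoop p (k - 1) (gn : Int)

-- ===== PRECONDITION & SPEC =====
-- A raises (UnboundLocalError) when neither k nor -k is in p, and raises (IndexError, px[j] exhausted or a
-- negative-index assignment out of range) for every k ≤ 0 on which the loop runs; Pre_ is exactly where A returns.
def Pre_k_sorting (k : Int) (p : List Int) : Prop := 1 ≤ k ∧ (k ∈ p ∨ -k ∈ p)
instance (k : Int) (p : List Int) : Decidable (Pre_k_sorting k p) := by unfold Pre_k_sorting; infer_instance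
def pvWitness_k_sorting : Int × List Int := (2, [1, -4, 2, 3])

def Spec_k_sorting (k : Int) (p : List Int) (out : List Int) : Prop := out = k_sorting_alt k p
instance (k : Int) (p : List Int) (out : List Int) : Decidable (Spec_k_sorting k p out) := by unfold Spec_k_sorting; infer_instance

-- ===== CLAIM (what is proved, stated in full; the proofs are below) =====
def Claim_equal_k_sorting : Prop := ∀ (k : Int) (p : List Int), Dom_k_sorting k p → Pre_k_sorting k p → Spec_k_sorting k p (k_sorting k p)

-- ===== LEMMAS AND PROOFS =====

-- A's loop, characterised elementwise: state (q, j), counter advancing with the index.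
theorem aLoop_getElem? (px : List Int) :
    ∀ (n : Nat) (a b : Int) (q : List Int) (j : Int), (b - a).toNat = n → 0 ≤ a →
      b ≤ (q.length : Int) →
      ∀ (i : Nat),
        (((PySem.List.pyRange a b 1).foldl
            (fun (st : List Int × Int) i =>
              (PySem.List.pySetD st.1 i (0 - PySem.List.pyGetD px st.2 0), st.2 + 1))
            (q, j)).1)[i]? =
          if a ≤ (i : Int) ∧ (i : Int) < b then some (0 - PySem.List.pyGetD px (j + i - a) 0)
          else q[i]? := by
  intro n
  induction n with
  | zero =>
    intro a b q j hn ha hb i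
    rw [PySem.List.pyRange_one_eq_nil (by omega)]
    simp only [List.foldl_nil]
    rw [if_neg (by omega)]
  | succ m ih =>
    intro a b q j hn ha hb i
    rw [PySem.List.pyRange_one_cons (by omega)]
    simp only [List.foldl_cons]
    obtain ⟨q', hq'⟩ : ∃ q', PySem.List.pySetD q a (0 - PySem.List.pyGetD px j 0) = q' := ⟨_, rfl⟩
    rw [hq']
    have hq'set : q' = q.set a.toNat (0 - PySem.List.pyGetD px j 0) := by
      rw [← hq', PySem.List.pySetD_of_nonneg _ _ ha]
    have hlen' : q'.length = q.length := by rw [hq'set, List.length_set]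
    rw [ih (a + 1) b q' (j + 1) (by omega) (by omega) (by omega) i]
    by_cases hlo : (a : Int) + 1 ≤ (i : Int) ∧ (i : Int) < b
    · rw [if_pos hlo, if_pos (by omega)]
      have hje : j + 1 + (i : Int) - (a + 1) = j + (i : Int) - a := by omega
      rw [hje]
    · rw [if_neg hlo, hq'set]
      by_cases hie : (i : Int) = a
      · rw [if_pos (by omega)]
        have h1 : a.toNat = i := by omega
        have h2 : i < q.length := by omega
        rw [h1, List.getElem?_set_self h2]
        have h3 : j + (i : Int) - a = j := by omega
        rw [h3]
      · rw [if_neg (by omega), List.getElem?_set_ne (by omega)]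

-- B's loop, characterised elementwise.
theorem bLoop_getElem? :
    ∀ (n : Nat) (lo hi : Int) (q : List Int), (hi - lo + 1).toNat = n →
      0 ≤ lo → hi < (q.length : Int) →
      ∀ (i : Nat),
        (swapNegLoop q lo hi)[i]? =
          if lo ≤ (i : Int) ∧ (i : Int) ≤ hi then some (-(PySem.List.pyGetD q (lo + hi - i) 0))
          else q[i]? := by
  intro n
  induction n using Nat.strong_induction_on with
  | _ n ih =>
    intro lo hi q hn hlo hhi i
    rw [swapNegLoop]
    by_cases hlt : lo < hi
    · rw [if_pos hlt]
      have hlolen : lo < (q.length : Int) := by omega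
      obtain ⟨v1, hv1⟩ : ∃ v, -(PySem.List.pyGetD q hi 0) = v := ⟨_, rfl⟩
      obtain ⟨v2, hv2⟩ : ∃ v, -(PySem.List.pyGetD q lo 0) = v := ⟨_, rfl⟩
      rw [hv1, hv2]
      obtain ⟨q', hq'⟩ : ∃ q', PySem.List.pySetD (PySem.List.pySetD q lo v1) hi v2 = q' := ⟨_, rfl⟩
      rw [hq']
      have hq'set : q' = (q.set lo.toNat v1).set hi.toNat v2 := by
        rw [← hq', PySem.List.pySetD_of_nonneg _ _ hlo, PySem.List.pySetD_of_nonneg _ _ (by omega)]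
      have hlen' : q'.length = q.length := by rw [hq'set]; simp
      have hq'hi : hi - 1 < (q'.length : Int) := by rw [hlen']; omega
      rw [ih ((hi - 1) - (lo + 1) + 1).toNat (by omega) (lo + 1) (hi - 1) q' rfl (by omega) hq'hi i]
      have hget' : ∀ (t : Int), lo < t → t < hi →
          PySem.List.pyGetD q' t 0 = PySem.List.pyGetD q t 0 := by
        intro t ht1 ht2
        rw [PySem.List.pyGetD_eq_getElem q' 0 (by omega) (by omega),
            PySem.List.pyGetD_eq_getElem q 0 (by omega) (by omega)]
        simp only [hq'set]
        rw [List.getElem_set_ne (by omega), List.getElem_set_ne (by omega)]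
      by_cases hin : lo + 1 ≤ (i : Int) ∧ (i : Int) ≤ hi - 1
      · rw [if_pos hin, if_pos (by omega)]
        have : lo + 1 + (hi - 1) - (i : Int) = lo + hi - (i : Int) := by omega
        rw [this, hget' (lo + hi - i) (by omega) (by omega)]
      · rw [if_neg hin]
        by_cases hieq : (i : Int) = lo
        · rw [if_pos (by omega)]
          have h1 : i = lo.toNat := by omega
          have h2 : lo + hi - (i : Int) = hi := by omega
          rw [h2, hq'set, h1]
          rw [List.getElem?_set_ne (by omega), List.getElem?_set_self (by omega), ← hv1]
        · by_cases hihi : (i : Int) = hi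
          · rw [if_pos (by omega)]
            have h1 : i = hi.toNat := by omega
            have h2 : lo + hi - (i : Int) = lo := by omega
            rw [h2, hq'set, h1]
            rw [List.getElem?_set_self (by simp; omega), ← hv2]
          · rw [if_neg (by omega), hq'set]
            rw [List.getElem?_set_ne (by omega), List.getElem?_set_ne (by omega)]
    · rw [if_neg hlt]
      by_cases heq : lo = hi
      · rw [if_pos heq, PySem.List.pySetD_of_nonneg _ _ hlo]
        by_cases hieq : (i : Int) = lo
        · rw [if_pos (by omega)]
          have h1 : lo.toNat = i := by omega
          have h2 : lo + hi - (i : Int) = lo := by omega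
          rw [h1, List.getElem?_set_self (by omega), h2]
        · rw [if_neg (by omega), List.getElem?_set_ne (by omega)]
      · rw [if_neg heq, if_neg (by omega)]

-- ===== VERDICT (by name: the statement is the Claim_ definition above) =====
theorem k_sorting_spec : Claim_equal_k_sorting := by
  intro k p _hdom hpre
  obtain ⟨hk, hmem⟩ := hpre
  unfold Spec_k_sorting k_sorting k_sorting_alt
  simp only
  cases hgn : (if k ∈ p then PySem.List.index? p k
      else if -k ∈ p then PySem.List.index? p (-k) else none) with
  | none => rfl
  | some gn =>
    have hglen : gn < p.length := by
      by_cases h1 : k ∈ p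
      · rw [if_pos h1] at hgn
        obtain ⟨hk', _, _⟩ := PySem.List.getElem_of_index?_eq_some hgn
        exact hk'
      · rw [if_neg h1, if_pos (by tauto)] at hgn
        obtain ⟨hk', _, _⟩ := PySem.List.getElem_of_index?_eq_some hgn
        exact hk'
    have ha0 : (0 : Int) ≤ k - 1 := by omega
    set a : Nat := (k - 1).toNat with hadef
    have hak : (a : Int) = k - 1 := by omega
    apply List.ext_getElem?
    intro i
    rw [aLoop_getElem? _ ((gn + 1 - (k - 1)).toNat) (k - 1) ((gn : Int) + 1) p 0 rfl ha0
      (by omega) i]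
    rw [bLoop_getElem? (((gn : Int) - (k - 1) + 1).toNat) (k - 1) (gn : Int) p rfl ha0
      (by omega) i]
    by_cases hin : (k - 1 : Int) ≤ (i : Int) ∧ (i : Int) < (gn : Int) + 1
    · rw [if_pos hin, if_pos (by omega)]
      have hslice : PySem.List.slice p (some (k - 1)) (some ((gn : Int) + 1)) =
          (p.drop a).take (gn + 1 - a) := by
        have h1 : (k - 1 : Int) = ((a : Nat) : Int) := by omega
        have h2 : ((gn : Int) + 1) = (((gn + 1 : Nat)) : Int) := by push_cast; ring
        rw [h1, h2, PySem.List.slice_natCast]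
      have hag : a ≤ gn := by omega
      have hi_a : a ≤ i := by omega
      have hi_g : i ≤ gn := by omega
      obtain ⟨seg, hseg⟩ : ∃ s, (p.drop a).take (gn + 1 - a) = s := ⟨_, rfl⟩
      rw [hseg] at hslice
      have hseglen : seg.length = gn + 1 - a := by
        rw [← hseg, List.length_take, List.length_drop]
        omega
      have hia : i - a < seg.length := by omega
      have hrevlen : i - a < seg.reverse.length := by simpa using hia
      have hj : (0 : Int) + (i : Int) - (k - 1) = ((i - a : Nat) : Int) := by omega
      rw [hslice, hj, PySem.List.pyGetD_natCast, List.getD_eq_getElem _ _ hrevlen,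
          List.getElem_reverse]
      have hsegget : seg[seg.length - 1 - (i - a)]'(by omega) = p[a + (gn - i)]'(by omega) := by
        simp only [← hseg]
        rw [List.getElem_take, List.getElem_drop]
        congr 1
        rw [hseg, hseglen]
        omega
      rw [hsegget]
      have hr : (k - 1 : Int) + (gn : Int) - (i : Int) = (((a + (gn - i)) : Nat) : Int) := by omega
      rw [hr, PySem.List.pyGetD_natCast, List.getD_eq_getElem _ _ (by omega)]
      simp
    · rw [if_neg hin, if_neg (by omega)]
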